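-- pv_equiv track=rewrite | github.com/Angela-OH/Algorithm | 기타/BucketPlace_1.py | solution
-- ===== SOURCE A (Python) =====
-- def solution(nums):
--     left = [False for _ in range(len(nums))]
--     right = [False for _ in range(len(nums))]
--
--     min_v = nums[0]
--     for i in range(1, len(nums)):
--         min_v = min(min_v, nums[i])
--         if nums[i] > min_v:
--             left[i] = True
--
--     max_v = nums[-1]
--     for i in range(len(nums) - 2, -1, -1):
--         max_v = max(max_v, nums[i])
--         if nums[i] < max_v:
--             right[i] = True
--
--     for i in range(len(nums)):
--         if left[i] and right[i]:
--             return True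
--
--     return False
-- ===== SOURCE B (Python) =====
-- def solution(nums):
--     first = second = None
--     for n in nums:
--         if first is None or n <= first:
--             first = n
--         elif second is None or n <= second:
--             second = n
--         else:
--             return True
--     return False
-- ===== Notes on version B (the rewrite author's own statement) =====
-- stated objective: faster
-- what changed: Replaced A's three passes with two allocated boolean arrays (prefix-min pass, suffix-max pass, combine pass) by the classic one-pass two-candidate greedy increasing-triplet test in O(1) extra space with early exit.
import Mathlib
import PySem

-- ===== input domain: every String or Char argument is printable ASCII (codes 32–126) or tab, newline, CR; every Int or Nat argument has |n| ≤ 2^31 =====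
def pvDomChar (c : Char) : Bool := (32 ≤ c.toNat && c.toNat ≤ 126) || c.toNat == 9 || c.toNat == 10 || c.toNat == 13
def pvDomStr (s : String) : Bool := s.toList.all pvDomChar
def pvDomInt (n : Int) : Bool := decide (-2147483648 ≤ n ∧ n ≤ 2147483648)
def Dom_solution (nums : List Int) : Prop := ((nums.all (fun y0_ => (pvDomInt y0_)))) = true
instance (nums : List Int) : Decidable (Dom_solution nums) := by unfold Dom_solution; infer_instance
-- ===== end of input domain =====

-- B replaces A's three passes with two boolean arrays by the one-pass two-candidate greedy
-- increasing-triplet test (O(1) extra space); equal to A on every nonempty list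
-- (A raises IndexError on the empty list, where B returns False).

-- ===== PORT A =====
-- A's forward loop: min_v runs over the prefix; the entry for index i is
-- `nums[i] > min_v` AFTER the update `min_v = min(min_v, nums[i])`.  The index loop
-- writing `left[i] = True` in increasing order is rendered as the structural recursion
-- producing the entries in that same order with the same state min_v.
def solutionFwd (min_v : Int) : List Int → List Bool
  | [] => []
  | x :: t => decide (x > min min_v x) :: solutionFwd (min min_v x) t

-- A's backward loop: max_v starts at nums[-1] and runs from the right; the entry for
-- index i is `nums[i] < max_v` AFTER `max_v = max(max_v, nums[i])`; rendered right-to-left,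
-- returning the running max together with the built `right` list.
def solutionBwd : List Int → Int × List Bool
  | [] => (0, [])
  | [x] => (x, [false])
  | x :: y :: t =>
    (max (solutionBwd (y :: t)).1 x,
     decide (x < max (solutionBwd (y :: t)).1 x) :: (solutionBwd (y :: t)).2)

def solution (nums : List Int) : Bool :=
  match nums with
  | [] => false              -- Python raises IndexError on nums[0]; excluded by Pre_solution
  | x :: t =>
    let left := false :: solutionFwd x t
    let right := (solutionBwd (x :: t)).2
    (left.zip right).any (fun p => p.1 && p.2)

-- ===== PORT B =====
-- `first is None or n <= first` (None plays the role of +infinity)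
def solutionLeOpt (n : Int) : Option Int → Bool
  | none => true
  | some v => decide (n ≤ v)

def solutionGreedy : List Int → Option Int → Option Int → Bool
  | [], _, _ => false
  | n :: t, first, second =>
    if solutionLeOpt n first then solutionGreedy t (some n) second
    else if solutionLeOpt n second then solutionGreedy t first (some n)
    else true

def solution_alt (nums : List Int) : Bool :=
  solutionGreedy nums none none


-- ===== PRECONDITION & SPEC =====
-- Pre_ excludes only the empty list, on which A raises IndexError (nums[0]).
def Pre_solution (nums : List Int) : Prop := nums ≠ []
instance (nums : List Int) : Decidable (Pre_solution nums) := by unfold Pre_solution; infer_instance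
def pvWitness_solution : List Int := ([1, 0, 2, 3])

def Spec_solution (nums : List Int) (out : Bool) : Prop := out = solution_alt nums
instance (nums : List Int) (out : Bool) : Decidable (Spec_solution nums out) := by unfold Spec_solution; infer_instance

-- ===== CLAIM (what is proved, stated in full; the proofs are below) =====
def Claim_equal_solution : Prop := ∀ (nums : List Int), Dom_solution nums → Pre_solution nums → Spec_solution nums (solution nums)

-- ===== LEMMAS AND PROOFS =====

-- Both programs are proved equivalent to the same specification: the list contains a
-- strictly increasing triplet as a sublist.
def HasTriplet (l : List Int) : Prop := ∃ a b c : Int, a < b ∧ b < c ∧ List.Sublist [a, b, c] l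

-- ## generic sublist helpers

theorem sublist_append_single {l p : List Int} {n : Int}
    (h : List.Sublist l (p ++ [n])) :
    List.Sublist l p ∨ ∃ l', l = l' ++ [n] ∧ List.Sublist l' p := by
  rcases List.sublist_append_iff.1 h with ⟨l₁, l₂, rfl, h₁, h₂⟩
  rcases List.sublist_singleton.1 h₂ with rfl | rfl
  · exact Or.inl (by simpa using h₁)
  · exact Or.inr ⟨l₁, rfl, h₁⟩

theorem pair_append_single {a b : Int} {p : List Int} {n : Int}
    (h : List.Sublist [a, b] (p ++ [n])) :
    List.Sublist [a, b] p ∨ (b = n ∧ a ∈ p) := by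
  rcases sublist_append_single h with h' | ⟨l', he, h'⟩
  · exact Or.inl h'
  · have : l' = [a] ∧ b = n := by
      cases l' with
      | nil => simp at he
      | cons u l'' =>
        cases l'' with
        | nil => simp_all
        | cons v l''' =>
          cases l''' with
          | nil => simp_all
          | cons w l4 => simp at he
    rcases this with ⟨rfl, rfl⟩
    exact Or.inr ⟨rfl, (List.singleton_sublist.1 h')⟩

theorem triple_append_single {a b c : Int} {p : List Int} {n : Int}
    (h : List.Sublist [a, b, c] (p ++ [n])) :
    List.Sublist [a, b, c] p ∨ (c = n ∧ List.Sublist [a, b] p) := by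
  rcases sublist_append_single h with h' | ⟨l', he, h'⟩
  · exact Or.inl h'
  · have : l' = [a, b] ∧ c = n := by
      cases l' with
      | nil => simp at he
      | cons u l'' =>
        cases l'' with
        | nil => simp at he
        | cons v l''' =>
          cases l''' with
          | nil => simp_all
          | cons w l4 =>
            cases l4 with
            | nil => simp_all
            | cons z l5 => simp at he
    rcases this with ⟨rfl, rfl⟩
    exact Or.inr ⟨rfl, h'⟩

theorem triple_decomp {a b c : Int} {l : List Int}
    (h : List.Sublist [a, b, c] l) :
    ∃ l₁ l₂, l = l₁ ++ b :: l₂ ∧ a ∈ l₁ ∧ c ∈ l₂ := by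
  rcases List.cons_sublist_iff.1 h with ⟨r₁, r₂, rfl, ha, h2⟩
  rcases List.cons_sublist_iff.1 h2 with ⟨s₁, s₂, rfl, hb, h3⟩
  have hc : c ∈ s₂ := by simpa [List.singleton_sublist] using h3
  rcases List.append_of_mem hb with ⟨u, v, rfl⟩
  exact ⟨r₁ ++ u, v ++ s₂, by simp, by simp [ha], by simp [hc]⟩

-- ## A-side characterization

theorem fwd_length (t : List Int) (m : Int) : (solutionFwd m t).length = t.length := by
  induction t generalizing m with
  | nil => rfl
  | cons x t ih => simp [solutionFwd, ih]

theorem fwd_get (t : List Int) (m : Int) (i : Nat) (h : i < t.length) :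
    (solutionFwd m t)[i]'(by rw [fwd_length]; exact h) =
      decide (m < t[i] ∨ ∃ a ∈ t.take i, a < t[i]) := by
  induction t generalizing m i with
  | nil => simp at h
  | cons x t ih =>
    cases i with
    | zero =>
      simp only [solutionFwd, List.getElem_cons_zero, List.take_zero]
      apply decide_eq_decide.mpr
      constructor
      · intro hx; exact Or.inl (by omega)
      · rintro (hx | ⟨a, ha, _⟩)
        · omega
        · simp at ha
    | succ i =>
      simp only [solutionFwd, List.getElem_cons_succ, List.take_succ_cons]
      rw [ih (min m x) i (by simpa using h)]
      apply decide_eq_decide.mpr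
      constructor
      · rintro (hx | ⟨a, ha, hlt⟩)
        · rcases min_lt_iff.1 hx with h1 | h2
          · exact Or.inl h1
          · exact Or.inr ⟨x, by simp, h2⟩
        · exact Or.inr ⟨a, by simp [ha], hlt⟩
      · rintro (hx | ⟨a, ha, hlt⟩)
        · exact Or.inl (by omega)
        · rcases List.mem_cons.1 ha with rfl | ha'
          · exact Or.inl (by omega)
          · exact Or.inr ⟨a, ha', hlt⟩

theorem left_get (x : Int) (t : List Int) (j : Nat) (h : j < (x :: t).length) :
    (false :: solutionFwd x t)[j]'(by simp [fwd_length]; simpa using h) =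
      decide (∃ a ∈ (x :: t).take j, a < (x :: t)[j]) := by
  cases j with
  | zero => simp
  | succ j =>
    have hj : j < t.length := by simpa using h
    simp only [List.getElem_cons_succ, List.take_succ_cons]
    rw [fwd_get t x j hj]
    apply decide_eq_decide.mpr
    constructor
    · rintro (hx | ⟨a, ha, hlt⟩)
      · exact ⟨x, by simp, hx⟩
      · exact ⟨a, by simp [ha], hlt⟩
    · rintro ⟨a, ha, hlt⟩
      rcases List.mem_cons.1 ha with rfl | ha'
      · exact Or.inl hlt
      · exact Or.inr ⟨a, ha', hlt⟩

theorem bwd_length (t : List Int) : (solutionBwd t).2.length = t.length := by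
  induction t with
  | nil => rfl
  | cons x t ih =>
    cases t with
    | nil => rfl
    | cons y t' => simpa [solutionBwd] using ih

theorem bwd_spec (t : List Int) (ht : t ≠ []) :
    ((solutionBwd t).1 ∈ t ∧ ∀ c ∈ t, c ≤ (solutionBwd t).1) ∧
    (solutionBwd t).2.length = t.length ∧
    ∀ i (h : i < t.length),
      (solutionBwd t).2[i]'(by rw [bwd_length]; exact h) = decide (∃ c ∈ t.drop (i + 1), t[i] < c) := by
  induction t with
  | nil => simp at ht
  | cons x t ih =>
    cases t with
    | nil =>
      refine ⟨⟨by simp [solutionBwd], by simp [solutionBwd]⟩, by simp [solutionBwd], ?_⟩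
      intro i h
      have : i = 0 := by simpa using h
      subst this
      simp [solutionBwd]
    | cons y t' =>
      obtain ⟨⟨hmem, hub⟩, hlen, hget⟩ := ih (by simp)
      refine ⟨⟨?_, ?_⟩, ?_, ?_⟩
      · show max (solutionBwd (y :: t')).1 x ∈ x :: y :: t'
        rcases max_cases (solutionBwd (y :: t')).1 x with ⟨he, _⟩ | ⟨he, _⟩
        · rw [he]; exact List.mem_cons_of_mem x hmem
        · rw [he]; exact List.mem_cons_self
      · intro c hc
        rcases List.mem_cons.1 hc with rfl | hc'
        · show c ≤ max (solutionBwd (y :: t')).1 c; exact le_max_right _ _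
        · show c ≤ max (solutionBwd (y :: t')).1 x
          exact le_trans (hub c hc') (le_max_left _ _)
      · show (decide (x < max (solutionBwd (y :: t')).1 x) :: (solutionBwd (y :: t')).2).length = _
        simp [hlen]
      · intro i h
        cases i with
        | zero =>
          show decide (x < max (solutionBwd (y :: t')).1 x) = _
          apply decide_eq_decide.mpr
          simp only [List.getElem_cons_zero]
          constructor
          · intro hx
            have hxm : x < (solutionBwd (y :: t')).1 := by omega
            exact ⟨_, hmem, hxm⟩
          · rintro ⟨c, hc, hlt⟩
            have := hub c hc
            omega
        | succ i =>
          have hi : i < (y :: t').length := by simpa using h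
          show (decide (x < max (solutionBwd (y :: t')).1 x) :: (solutionBwd (y :: t')).2)[i+1]'(by simp [bwd_length]; simpa using h) = _
          simp only [List.getElem_cons_succ]
          rw [hget i hi]
          rfl

theorem take_drop_triplet {l : List Int} {i : Nat} (h : i < l.length)
    (hL : ∃ a ∈ l.take i, a < l[i]) (hR : ∃ c ∈ l.drop (i + 1), l[i] < c) :
    HasTriplet l := by
  obtain ⟨a, ha, hal⟩ := hL
  obtain ⟨c, hc, hcl⟩ := hR
  refine ⟨a, l[i], c, hal, hcl, ?_⟩
  have hs : List.Sublist ([a] ++ (l[i] :: [c])) (l.take i ++ (l[i] :: l.drop (i + 1))) :=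
    List.Sublist.append (List.singleton_sublist.2 ha)
      (List.Sublist.cons₂ _ (List.singleton_sublist.2 hc))
  have he : l.take i ++ (l[i] :: l.drop (i + 1)) = l := by
    rw [List.getElem_cons_drop h, List.take_append_drop]
  rw [he] at hs
  simpa using hs

theorem triplet_take_drop {l : List Int} (h : HasTriplet l) :
    ∃ i, ∃ hi : i < l.length,
      (∃ a ∈ l.take i, a < l[i]) ∧ (∃ c ∈ l.drop (i + 1), l[i] < c) := by
  obtain ⟨a, b, c, hab, hbc, hs⟩ := h
  obtain ⟨l₁, l₂, rfl, ha, hc⟩ := triple_decomp hs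
  refine ⟨l₁.length, by simp, ?_, ?_⟩
  · have hb : (l₁ ++ b :: l₂)[l₁.length]'(by simp) = b := by
      rw [List.getElem_append_right (le_refl _)]
      simp
    rw [hb, List.take_left]
    exact ⟨a, ha, hab⟩
  · have hb : (l₁ ++ b :: l₂)[l₁.length]'(by simp) = b := by
      rw [List.getElem_append_right (le_refl _)]
      simp
    have hd : (l₁ ++ b :: l₂).drop (l₁.length + 1) = l₂ := by
      have : l₁ ++ b :: l₂ = (l₁ ++ [b]) ++ l₂ := by simp
      rw [this]
      have hlen : (l₁ ++ [b]).length = l₁.length + 1 := by simp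
      rw [← hlen, List.drop_left]
    rw [hb, hd]
    exact ⟨c, hc, hbc⟩

theorem solutionA_iff (x : Int) (t : List Int) :
    solution (x :: t) = true ↔ HasTriplet (x :: t) := by
  have hLlen : (false :: solutionFwd x t).length = (x :: t).length := by
    simp [fwd_length]
  have hRlen : (solutionBwd (x :: t)).2.length = (x :: t).length := bwd_length _
  obtain ⟨-, -, hget⟩ := bwd_spec (x :: t) (by simp)
  constructor
  · intro hsol
    rw [solution, List.any_eq_true] at hsol
    obtain ⟨p, hp, hpt⟩ := hsol
    obtain ⟨i, hi, hpi⟩ := List.mem_iff_getElem.1 hp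
    have hi' : i < (x :: t).length := by
      rw [List.length_zip, hLlen, hRlen, Nat.min_self] at hi
      exact hi
    rw [List.getElem_zip] at hpi
    subst hpi
    simp only [Bool.and_eq_true] at hpt
    obtain ⟨h1, h2⟩ := hpt
    rw [left_get x t i hi'] at h1
    rw [hget i hi'] at h2
    exact take_drop_triplet hi' (by simpa using h1) (by simpa using h2)
  · intro htrip
    obtain ⟨i, hi, hL, hR⟩ := triplet_take_drop htrip
    rw [solution, List.any_eq_true]
    refine ⟨((false :: solutionFwd x t)[i]'(by rw [hLlen]; exact hi), (solutionBwd (x :: t)).2[i]'(by rw [hRlen]; exact hi)), ?_, ?_⟩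
    · rw [← List.getElem_zip (i := i)]
      exact List.getElem_mem (by rw [List.length_zip, hLlen, hRlen, Nat.min_self]; exact hi)
    · simp only [Bool.and_eq_true]
      constructor
      · rw [left_get x t i hi]; exact decide_eq_true hL
      · rw [hget i hi]; exact decide_eq_true hR

-- ## B-side (greedy) characterization

def GInv (p : List Int) (first second : Option Int) : Prop :=
  (match first with
   | none => p = []
   | some f => f ∈ p ∧ ∀ x ∈ p, f ≤ x) ∧
  (match second with
   | none => ∀ a b : Int, List.Sublist [a, b] p → ¬ a < b
   | some s => (∃ a, a < s ∧ List.Sublist [a, s] p) ∧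
               ∀ a b : Int, a < b → List.Sublist [a, b] p → s ≤ b) ∧
  ¬ HasTriplet p

theorem GInv_init : GInv [] none none := by
  refine ⟨rfl, ?_, ?_⟩
  · intro a b hs
    have := List.sublist_nil.1 hs
    simp at this
  · rintro ⟨a, b, c, -, -, hs⟩
    have := List.sublist_nil.1 hs
    simp at this

theorem first_min {p : List Int} {first second : Option Int} (h : GInv p first second) :
    ∀ a ∈ p, ∃ f, first = some f ∧ f ≤ a := by
  intro a ha
  obtain ⟨h1, -, -⟩ := h
  match first with
  | none => rw [h1] at ha; simp at ha
  | some f => exact ⟨f, rfl, h1.2 a ha⟩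

theorem GInv_step1 {p : List Int} {first second : Option Int} {n : Int}
    (h : GInv p first second) (hc : solutionLeOpt n first = true) :
    GInv (p ++ [n]) (some n) second := by
  obtain ⟨h1, h2, h3⟩ := h
  have hmin : ∀ x ∈ p, n ≤ x := by
    intro x hx
    obtain ⟨f, hf, hfa⟩ := first_min ⟨h1, h2, h3⟩ x hx
    rw [hf] at hc
    have : n ≤ f := by simpa [solutionLeOpt] using hc
    omega
  refine ⟨⟨by simp, ?_⟩, ?_, ?_⟩
  · intro x hx
    rcases List.mem_append.1 hx with hx' | hx'
    · exact hmin x hx'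
    · simp at hx'; omega
  · match second with
    | none =>
      intro a b hs hab
      rcases pair_append_single hs with hs' | ⟨rfl, ha⟩
      · exact h2 a b hs' hab
      · have := hmin a ha; omega
    | some s =>
      obtain ⟨⟨a, has, hsub⟩, hcomp⟩ := h2
      refine ⟨⟨a, has, hsub.trans (List.sublist_append_left _ _)⟩, ?_⟩
      intro a b hab hs
      rcases pair_append_single hs with hs' | ⟨rfl, ha⟩
      · exact hcomp a b hab hs'
      · have := hmin a ha; omega
  · rintro ⟨a, b, c, hab, hbc, hs⟩
    rcases triple_append_single hs with hs' | ⟨rfl, hp⟩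
    · exact h3 ⟨a, b, c, hab, hbc, hs'⟩
    · have ha : a ∈ p := hp.subset (by simp)
      have := hmin a ha
      omega

theorem GInv_step2 {p : List Int} {first second : Option Int} {n : Int}
    (h : GInv p first second) (hc1 : solutionLeOpt n first = false)
    (hc2 : solutionLeOpt n second = true) :
    GInv (p ++ [n]) first (some n) := by
  obtain ⟨h1, h2, h3⟩ := h
  obtain ⟨f, rfl, hfn⟩ : ∃ f, first = some f ∧ f < n := by
    match first with
    | none => simp [solutionLeOpt] at hc1
    | some f =>
      refine ⟨f, rfl, ?_⟩
      have : ¬ n ≤ f := by simpa [solutionLeOpt] using hc1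
      omega
  obtain ⟨hfmem, hfmin⟩ := h1
  refine ⟨⟨List.mem_append_left _ hfmem, ?_⟩, ?_, ?_⟩
  · intro x hx
    rcases List.mem_append.1 hx with hx' | hx'
    · exact hfmin x hx'
    · simp at hx'; omega
  · refine ⟨⟨f, hfn, ?_⟩, ?_⟩
    · have : List.Sublist [f] p := List.singleton_sublist.2 hfmem
      simpa using List.Sublist.append this (List.Sublist.refl [n])
    · intro a b hab hs
      rcases pair_append_single hs with hs' | ⟨rfl, ha⟩
      · match second with
        | none => exact absurd hab (h2 a b hs')
        | some s =>
          have hns : n ≤ s := by simpa [solutionLeOpt] using hc2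
          have := h2.2 a b hab hs'
          omega
      · omega
  · rintro ⟨a, b, c, hab, hbc, hs⟩
    rcases triple_append_single hs with hs' | ⟨hcn, hp⟩
    · exact h3 ⟨a, b, c, hab, hbc, hs'⟩
    · match second with
      | none => exact absurd hab (h2 a b hp)
      | some s =>
        have hns : n ≤ s := by simpa [solutionLeOpt] using hc2
        have := h2.2 a b hab hp
        omega

theorem greedy_sound (r : List Int) :
    ∀ (p : List Int) (first second : Option Int), GInv p first second →
      solutionGreedy r first second = true → HasTriplet (p ++ r) := by
  induction r with
  | nil =>
    intro p first second _ hg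
    simp [solutionGreedy] at hg
  | cons n t ih =>
    intro p first second hinv hg
    rw [solutionGreedy] at hg
    have hpr : p ++ n :: t = (p ++ [n]) ++ t := by simp
    by_cases hc1 : solutionLeOpt n first = true
    · rw [if_pos hc1] at hg
      rw [hpr]
      exact ih (p ++ [n]) (some n) second (GInv_step1 hinv hc1) hg
    · rw [if_neg hc1] at hg
      by_cases hc2 : solutionLeOpt n second = true
      · rw [if_pos hc2] at hg
        rw [hpr]
        exact ih (p ++ [n]) first (some n)
          (GInv_step2 hinv (by simpa using hc1) hc2) hg
      · obtain ⟨-, h2, -⟩ := hinv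
        match second with
        | none => simp [solutionLeOpt] at hc2
        | some s =>
          have hsn : s < n := by
            have : ¬ n ≤ s := by simpa [solutionLeOpt] using hc2
            omega
          obtain ⟨⟨a, has, hsub⟩, -⟩ := h2
          refine ⟨a, s, n, has, hsn, ?_⟩
          have h1 : List.Sublist ([a, s] ++ [n]) (p ++ n :: t) := by
            exact List.Sublist.append hsub (List.singleton_sublist.2 (by simp))
          simpa using h1

theorem greedy_complete (r : List Int) :
    ∀ (p : List Int) (first second : Option Int), GInv p first second →
      HasTriplet (p ++ r) → solutionGreedy r first second = true := by
  induction r with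
  | nil =>
    intro p first second hinv ht
    exact absurd (by simpa using ht) hinv.2.2
  | cons n t ih =>
    intro p first second hinv ht
    rw [solutionGreedy]
    have hpr : p ++ n :: t = (p ++ [n]) ++ t := by simp
    rw [hpr] at ht
    by_cases hc1 : solutionLeOpt n first = true
    · rw [if_pos hc1]
      exact ih (p ++ [n]) (some n) second (GInv_step1 hinv hc1) ht
    · rw [if_neg hc1]
      by_cases hc2 : solutionLeOpt n second = true
      · rw [if_pos hc2]
        exact ih (p ++ [n]) first (some n)
          (GInv_step2 hinv (by simpa using hc1) hc2) ht
      · rw [if_neg hc2]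

theorem solutionB_iff (l : List Int) : solution_alt l = true ↔ HasTriplet l := by
  constructor
  · intro h
    simpa using greedy_sound l [] none none GInv_init h
  · intro h
    exact greedy_complete l [] none none GInv_init (by simpa using h)

-- ===== VERDICT (by name: the statement is the Claim_ definition above) =====
theorem solution_spec : Claim_equal_solution := by
  intro nums _ hpre
  unfold Spec_solution
  cases nums with
  | nil => exact absurd rfl hpre
  | cons x t =>
    have hA := solutionA_iff x t
    have hB := solutionB_iff (x :: t)
    cases hA' : solution (x :: t) <;> cases hB' : solution_alt (x :: t) <;> simp_all
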